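-- pv_equiv track=rewrite | github.com/amiune/projecteuler | Problem054.py | maxOfAKind
-- ===== SOURCE A (Python) =====
-- cardValue = {'2':2,'3':3,'4':4,'5':5,'6':6,'7':7,'8':8,'9':9,'T':10,'J':11,'Q':12,'K':13,'A':14}
--
-- def maxOfAKind(cards):
--     maxOfAKind = []
--     counter = 1
--     cards = sorted(cards, key=lambda card: cardValue[card[0]])
--     for i in range(1,5):
--         if int(cardValue[cards[i][0]]) == int(cardValue[cards[i-1][0]]): counter += 1
--         else:
--             maxOfAKind.append((counter, int(cardValue[cards[i-1][0]])))
--             counter = 1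
--     maxOfAKind.append((counter, int(cardValue[cards[4][0]])))
--     maxOfAKind = sorted(maxOfAKind)
--     return maxOfAKind[-1], maxOfAKind[-2]
-- ===== SOURCE B (Python) =====
-- cardValue = {'2':2,'3':3,'4':4,'5':5,'6':6,'7':7,'8':8,'9':9,'T':10,'J':11,'Q':12,'K':13,'A':14}
--
-- def maxOfAKind(cards):
--     five = sorted(cards, key=lambda card: cardValue[card[0]])[:5]
--     counts = {}
--     for card in five:
--         v = cardValue[card[0]]
--         counts[v] = counts.get(v, 0) + 1
--     groups = sorted((c, v) for v, c in counts.items())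
--     return groups[-1], groups[-2]
-- ===== Notes on version B (the rewrite author's own statement) =====
-- stated objective: idiomatic
-- what changed: Replaces the index-based consecutive-run grouping loop over sorted positions 0..4 with a dict counter of rank values over the first five sorted cards, then sorts the (count, value) pairs.
import Mathlib
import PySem

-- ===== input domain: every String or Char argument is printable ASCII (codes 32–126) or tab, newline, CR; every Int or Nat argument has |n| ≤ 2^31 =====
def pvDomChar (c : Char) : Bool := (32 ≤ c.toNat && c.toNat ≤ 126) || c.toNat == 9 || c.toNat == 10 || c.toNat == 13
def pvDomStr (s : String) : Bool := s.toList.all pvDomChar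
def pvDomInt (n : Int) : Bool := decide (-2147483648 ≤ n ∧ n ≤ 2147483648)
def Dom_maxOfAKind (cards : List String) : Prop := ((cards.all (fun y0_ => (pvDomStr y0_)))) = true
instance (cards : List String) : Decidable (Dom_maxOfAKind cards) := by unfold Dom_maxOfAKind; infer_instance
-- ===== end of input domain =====

-- B replaces A's index-based consecutive-run grouping loop with a dict counter of rank
-- values over the first five sorted cards (idiomatic; equivalence is about return values;
-- A raises KeyError/IndexError outside Pre_, where the ports return a harmless default).

-- cardValue[s[0]]: `none` exactly where Python raises IndexError (empty string) or KeyError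
def rankVal? (s : String) : Option Int :=
  match s.toList with
  | [] => none
  | c :: _ =>
    if c = '2' then some 2 else if c = '3' then some 3 else if c = '4' then some 4
    else if c = '5' then some 5 else if c = '6' then some 6 else if c = '7' then some 7
    else if c = '8' then some 8 else if c = '9' then some 9 else if c = 'T' then some 10
    else if c = 'J' then some 11 else if c = 'Q' then some 12 else if c = 'K' then some 13
    else if c = 'A' then some 14 else none

-- total wrapper used by both ports; the default 0 is only reached outside Pre_
def rankVal (s : String) : Int := (rankVal? s).getD 0

-- ===== PORT A =====
def maxOfAKind (cards : List String) : (Int × Int) × (Int × Int) :=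
  let sortedCards := PySem.List.sorted cards (fun card => rankVal card) false
  let st := (PySem.List.pyRange 1 5 1).foldl
      (fun (st : List (Int × Int) × Int) i =>
        -- int(cardValue[cards[i][0]]) vs int(cardValue[cards[i-1][0]]); int() is the identity here
        let vi := rankVal ((PySem.List.pyGet? sortedCards i).getD "")
        let vp := rankVal ((PySem.List.pyGet? sortedCards (i - 1)).getD "")
        if vi = vp then (st.1, st.2 + 1)
        else (st.1 ++ [(st.2, vp)], 1))
      ([], 1)
  let groups := st.1 ++ [(st.2, rankVal ((PySem.List.pyGet? sortedCards 4).getD ""))]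
  let sortedGroups := PySem.List.sorted2 groups (fun p => p.1) (fun p => p.2) false
  ((PySem.List.pyGet? sortedGroups (-1)).getD (0, 0),
   (PySem.List.pyGet? sortedGroups (-2)).getD (0, 0))

-- ===== PORT B =====
def maxOfAKind_alt (cards : List String) : (Int × Int) × (Int × Int) :=
  -- sorted(cards, key=...)[:5]; the slice [:5] on a nonnegative bound is List.take 5
  let five := (PySem.List.sorted cards (fun card => rankVal card) false).take 5
  let counts := five.foldl
      (fun (d : PySem.Dict Int Int) card => d.insert (rankVal card) (d.getD (rankVal card) 0 + 1))
      PySem.Dict.empty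
  let groups := PySem.List.sorted2 (counts.items.map (fun p => (p.2, p.1)))
      (fun p => p.1) (fun p => p.2) false
  ((PySem.List.pyGet? groups (-1)).getD (0, 0),
   (PySem.List.pyGet? groups (-2)).getD (0, 0))

-- ===== PRECONDITION & SPEC =====
-- Pre_ excludes exactly the inputs where Python A raises: fewer than 5 cards (IndexError),
-- a card whose first character is not a rank key (KeyError / IndexError on ''), and hands
-- whose minimal rank occurs at least 5 times, where a single group makes [-2] an IndexError.
def Pre_maxOfAKind (cards : List String) : Prop :=
  5 ≤ cards.length ∧
  (∀ s ∈ cards, (rankVal? s).isSome) ∧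
  (∀ v ∈ cards.map rankVal, (∀ u ∈ cards.map rankVal, v ≤ u) → (cards.map rankVal).count v < 5)
instance (cards : List String) : Decidable (Pre_maxOfAKind cards) := by unfold Pre_maxOfAKind; infer_instance

def pvWitness_maxOfAKind : List String := ["2H", "3D", "5S", "9C", "KD"]

def Spec_maxOfAKind (cards : List String) (out : (Int × Int) × (Int × Int)) : Prop := out = maxOfAKind_alt cards
instance (cards : List String) (out : (Int × Int) × (Int × Int)) : Decidable (Spec_maxOfAKind cards out) := by unfold Spec_maxOfAKind; infer_instance

-- ===== CLAIM (what is proved, stated in full; the proofs are below) =====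
def Claim_equal_maxOfAKind : Prop := ∀ (cards : List String), Dom_maxOfAKind cards → Pre_maxOfAKind cards → Spec_maxOfAKind cards (maxOfAKind cards)

-- ===== LEMMAS AND PROOFS =====

-- ===== VERDICT (by name: the statement is the Claim_ definition above) =====
theorem maxOfAKind_spec : Claim_equal_maxOfAKind := by
  intro cards _ hpre
  obtain ⟨hlen, -, hmin⟩ := hpre
  obtain ⟨a, b, c, d, e, t, hS⟩ : ∃ a b c d e t,
      PySem.List.sorted cards (fun card => rankVal card) false = a :: b :: c :: d :: e :: t := by
    have h5 : 5 ≤ (PySem.List.sorted cards (fun card => rankVal card) false).length := by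
      rw [PySem.List.length_sorted]; exact hlen
    rcases hL : PySem.List.sorted cards (fun card => rankVal card) false with
        _ | ⟨a, _ | ⟨b, _ | ⟨c, _ | ⟨d, _ | ⟨e, t⟩⟩⟩⟩⟩ <;>
      first
        | exact ⟨_, _, _, _, _, _, rfl⟩
        | (rw [hL] at h5; simp at h5)
  have hperm := ((PySem.List.sorted_perm cards (fun card => rankVal card) false).map rankVal)
  rw [hS] at hperm
  have hp := PySem.List.sorted_pairwise cards (fun card => rankVal card)
  rw [hS] at hp
  rw [List.pairwise_cons] at hp
  obtain ⟨h1, hp⟩ := hp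
  rw [List.pairwise_cons] at hp
  obtain ⟨h2, hp⟩ := hp
  rw [List.pairwise_cons] at hp
  obtain ⟨h3, hp⟩ := hp
  rw [List.pairwise_cons] at hp
  obtain ⟨h4, -⟩ := hp
  have hab : rankVal a ≤ rankVal b := h1 b (by simp)
  have hbc : rankVal b ≤ rankVal c := h2 c (by simp)
  have hcd : rankVal c ≤ rankVal d := h3 d (by simp)
  have hde : rankVal d ≤ rankVal e := h4 e (by simp)
  have hhead := PySem.List.key_head_sorted_le cards (fun card => rankVal card) hS
  have hne : ¬ (rankVal b = rankVal a ∧ rankVal c = rankVal b ∧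
      rankVal d = rankVal c ∧ rankVal e = rankVal d) := by
    rintro ⟨e1, e2, e3, e4⟩
    have hmem : rankVal a ∈ cards.map rankVal := hperm.mem_iff.mp (by simp)
    have hle : ∀ u ∈ cards.map rankVal, rankVal a ≤ u := by
      intro u hu
      obtain ⟨y, hy, rfl⟩ := List.mem_map.mp hu
      exact hhead y hy
    have hcount := hmin (rankVal a) hmem hle
    rw [← hperm.count_eq] at hcount
    simp [List.count_cons, e1, e2, e3, e4] at hcount
    omega
  unfold Spec_maxOfAKind maxOfAKind maxOfAKind_alt
  rw [hS]
  have hpy : PySem.List.pyRange 1 5 1 = [1, 2, 3, 4] := by decide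
  have g0 : PySem.List.pyGet? (a :: b :: c :: d :: e :: t) 0 = some a := by
    simp [PySem.List.pyGet?, PySem.List.pyIdx?]; split
    · rfl
    · omega
  have g1 : PySem.List.pyGet? (a :: b :: c :: d :: e :: t) 1 = some b := by
    simp [PySem.List.pyGet?, PySem.List.pyIdx?]; split
    · rfl
    · omega
  have g2 : PySem.List.pyGet? (a :: b :: c :: d :: e :: t) 2 = some c := by
    simp [PySem.List.pyGet?, PySem.List.pyIdx?]; split
    · rfl
    · omega
  have g3 : PySem.List.pyGet? (a :: b :: c :: d :: e :: t) 3 = some d := by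
    simp [PySem.List.pyGet?, PySem.List.pyIdx?]; split
    · rfl
    · omega
  have g4 : PySem.List.pyGet? (a :: b :: c :: d :: e :: t) 4 = some e := by
    simp [PySem.List.pyGet?, PySem.List.pyIdx?]; split
    · rfl
    · omega
  have hc : List.foldl
        (fun (d : PySem.Dict Int Int) card => d.insert (rankVal card) (d.getD (rankVal card) 0 + 1))
        PySem.Dict.empty [a, b, c, d, e]
      = PySem.Dict.counter [rankVal a, rankVal b, rankVal c, rankVal d, rankVal e] := by
    rw [← PySem.Dict.foldl_insert_getD_add_one_eq_counter]
    rfl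
  rw [hpy]
  simp only [List.take_succ_cons, List.take_zero]
  rw [hc, PySem.Dict.items_counter]
  simp [List.foldl, g0, g1, g2, g3, g4, List.map_map, Function.comp]
  by_cases q1 : rankVal b = rankVal a
  · -- q1 true
    by_cases q2 : rankVal c = rankVal b
    · -- q2 true
      by_cases q3 : rankVal d = rankVal c
      · -- q3 true
        by_cases q4 : rankVal e = rankVal d
        · -- q4 true
          exact absurd ⟨q1, q2, q3, q4⟩ hne
        · -- q4 false
          have n1 : rankVal a ≠ rankVal e := by omega
          simp [q1, q2, q3, q4, List.count_cons, List.count_nil, PySem.Set.ofList, PySem.Set.add, PySem.Set.contains, PySem.Set.empty, List.foldl, Function.comp, n1, Ne.symm n1]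
      · -- q3 false
        by_cases q4 : rankVal e = rankVal d
        · -- q4 true
          have n1 : rankVal a ≠ rankVal d := by omega
          simp [q1, q2, q3, q4, List.count_cons, List.count_nil, PySem.Set.ofList, PySem.Set.add, PySem.Set.contains, PySem.Set.empty, List.foldl, Function.comp, n1, Ne.symm n1]
        · -- q4 false
          have n1 : rankVal a ≠ rankVal d := by omega
          have n2 : rankVal a ≠ rankVal e := by omega
          have n3 : rankVal d ≠ rankVal e := by omega
          simp [q1, q2, q3, q4, List.count_cons, List.count_nil, PySem.Set.ofList, PySem.Set.add, PySem.Set.contains, PySem.Set.empty, List.foldl, Function.comp, n1, Ne.symm n1, n2, Ne.symm n2, n3, Ne.symm n3]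
    · -- q2 false
      by_cases q3 : rankVal d = rankVal c
      · -- q3 true
        by_cases q4 : rankVal e = rankVal d
        · -- q4 true
          have n1 : rankVal a ≠ rankVal c := by omega
          simp [q1, q2, q3, q4, List.count_cons, List.count_nil, PySem.Set.ofList, PySem.Set.add, PySem.Set.contains, PySem.Set.empty, List.foldl, Function.comp, n1, Ne.symm n1]
        · -- q4 false
          have n1 : rankVal a ≠ rankVal c := by omega
          have n2 : rankVal a ≠ rankVal e := by omega
          have n3 : rankVal c ≠ rankVal e := by omega
          simp [q1, q2, q3, q4, List.count_cons, List.count_nil, PySem.Set.ofList, PySem.Set.add, PySem.Set.contains, PySem.Set.empty, List.foldl, Function.comp, n1, Ne.symm n1, n2, Ne.symm n2, n3, Ne.symm n3]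
      · -- q3 false
        by_cases q4 : rankVal e = rankVal d
        · -- q4 true
          have n1 : rankVal a ≠ rankVal c := by omega
          have n2 : rankVal a ≠ rankVal d := by omega
          have n3 : rankVal c ≠ rankVal d := by omega
          simp [q1, q2, q3, q4, List.count_cons, List.count_nil, PySem.Set.ofList, PySem.Set.add, PySem.Set.contains, PySem.Set.empty, List.foldl, Function.comp, n1, Ne.symm n1, n2, Ne.symm n2, n3, Ne.symm n3]
        · -- q4 false
          have n1 : rankVal a ≠ rankVal c := by omega
          have n2 : rankVal a ≠ rankVal d := by omega
          have n3 : rankVal a ≠ rankVal e := by omega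
          have n4 : rankVal c ≠ rankVal d := by omega
          have n5 : rankVal c ≠ rankVal e := by omega
          have n6 : rankVal d ≠ rankVal e := by omega
          simp [q1, q2, q3, q4, List.count_cons, List.count_nil, PySem.Set.ofList, PySem.Set.add, PySem.Set.contains, PySem.Set.empty, List.foldl, Function.comp, n1, Ne.symm n1, n2, Ne.symm n2, n3, Ne.symm n3, n4, Ne.symm n4, n5, Ne.symm n5, n6, Ne.symm n6]
  · -- q1 false
    by_cases q2 : rankVal c = rankVal b
    · -- q2 true
      by_cases q3 : rankVal d = rankVal c
      · -- q3 true
        by_cases q4 : rankVal e = rankVal d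
        · -- q4 true
          have n1 : rankVal a ≠ rankVal b := by omega
          simp [q1, q2, q3, q4, List.count_cons, List.count_nil, PySem.Set.ofList, PySem.Set.add, PySem.Set.contains, PySem.Set.empty, List.foldl, Function.comp, n1, Ne.symm n1]
        · -- q4 false
          have n1 : rankVal a ≠ rankVal b := by omega
          have n2 : rankVal a ≠ rankVal e := by omega
          have n3 : rankVal b ≠ rankVal e := by omega
          simp [q1, q2, q3, q4, List.count_cons, List.count_nil, PySem.Set.ofList, PySem.Set.add, PySem.Set.contains, PySem.Set.empty, List.foldl, Function.comp, n1, Ne.symm n1, n2, Ne.symm n2, n3, Ne.symm n3]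
      · -- q3 false
        by_cases q4 : rankVal e = rankVal d
        · -- q4 true
          have n1 : rankVal a ≠ rankVal b := by omega
          have n2 : rankVal a ≠ rankVal d := by omega
          have n3 : rankVal b ≠ rankVal d := by omega
          simp [q1, q2, q3, q4, List.count_cons, List.count_nil, PySem.Set.ofList, PySem.Set.add, PySem.Set.contains, PySem.Set.empty, List.foldl, Function.comp, n1, Ne.symm n1, n2, Ne.symm n2, n3, Ne.symm n3]
        · -- q4 false
          have n1 : rankVal a ≠ rankVal b := by omega
          have n2 : rankVal a ≠ rankVal d := by omega
          have n3 : rankVal a ≠ rankVal e := by omega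
          have n4 : rankVal b ≠ rankVal d := by omega
          have n5 : rankVal b ≠ rankVal e := by omega
          have n6 : rankVal d ≠ rankVal e := by omega
          simp [q1, q2, q3, q4, List.count_cons, List.count_nil, PySem.Set.ofList, PySem.Set.add, PySem.Set.contains, PySem.Set.empty, List.foldl, Function.comp, n1, Ne.symm n1, n2, Ne.symm n2, n3, Ne.symm n3, n4, Ne.symm n4, n5, Ne.symm n5, n6, Ne.symm n6]
    · -- q2 false
      by_cases q3 : rankVal d = rankVal c
      · -- q3 true
        by_cases q4 : rankVal e = rankVal d
        · -- q4 true
          have n1 : rankVal a ≠ rankVal b := by omega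
          have n2 : rankVal a ≠ rankVal c := by omega
          have n3 : rankVal b ≠ rankVal c := by omega
          simp [q1, q2, q3, q4, List.count_cons, List.count_nil, PySem.Set.ofList, PySem.Set.add, PySem.Set.contains, PySem.Set.empty, List.foldl, Function.comp, n1, Ne.symm n1, n2, Ne.symm n2, n3, Ne.symm n3]
        · -- q4 false
          have n1 : rankVal a ≠ rankVal b := by omega
          have n2 : rankVal a ≠ rankVal c := by omega
          have n3 : rankVal a ≠ rankVal e := by omega
          have n4 : rankVal b ≠ rankVal c := by omega
          have n5 : rankVal b ≠ rankVal e := by omega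
          have n6 : rankVal c ≠ rankVal e := by omega
          simp [q1, q2, q3, q4, List.count_cons, List.count_nil, PySem.Set.ofList, PySem.Set.add, PySem.Set.contains, PySem.Set.empty, List.foldl, Function.comp, n1, Ne.symm n1, n2, Ne.symm n2, n3, Ne.symm n3, n4, Ne.symm n4, n5, Ne.symm n5, n6, Ne.symm n6]
      · -- q3 false
        by_cases q4 : rankVal e = rankVal d
        · -- q4 true
          have n1 : rankVal a ≠ rankVal b := by omega
          have n2 : rankVal a ≠ rankVal c := by omega
          have n3 : rankVal a ≠ rankVal d := by omega
          have n4 : rankVal b ≠ rankVal c := by omega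
          have n5 : rankVal b ≠ rankVal d := by omega
          have n6 : rankVal c ≠ rankVal d := by omega
          simp [q1, q2, q3, q4, List.count_cons, List.count_nil, PySem.Set.ofList, PySem.Set.add, PySem.Set.contains, PySem.Set.empty, List.foldl, Function.comp, n1, Ne.symm n1, n2, Ne.symm n2, n3, Ne.symm n3, n4, Ne.symm n4, n5, Ne.symm n5, n6, Ne.symm n6]
        · -- q4 false
          have n1 : rankVal a ≠ rankVal b := by omega
          have n2 : rankVal a ≠ rankVal c := by omega
          have n3 : rankVal a ≠ rankVal d := by omega
          have n4 : rankVal a ≠ rankVal e := by omega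
          have n5 : rankVal b ≠ rankVal c := by omega
          have n6 : rankVal b ≠ rankVal d := by omega
          have n7 : rankVal b ≠ rankVal e := by omega
          have n8 : rankVal c ≠ rankVal d := by omega
          have n9 : rankVal c ≠ rankVal e := by omega
          have n10 : rankVal d ≠ rankVal e := by omega
          simp [q1, q2, q3, q4, List.count_cons, List.count_nil, PySem.Set.ofList, PySem.Set.add, PySem.Set.contains, PySem.Set.empty, List.foldl, Function.comp, n1, Ne.symm n1, n2, Ne.symm n2, n3, Ne.symm n3, n4, Ne.symm n4, n5, Ne.symm n5, n6, Ne.symm n6, n7, Ne.symm n7, n8, Ne.symm n8, n9, Ne.symm n9, n10, Ne.symm n10]
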